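-- pv_equiv track=rewrite | github.com/cduartes0203/J3C_Extended | Utils99.py | sum_non_zero_intervals
-- ===== SOURCE A (Python) =====
-- def sum_non_zero_intervals(vector):
--     # Initialize variables
--     sums = []
--     current_sum = 0
--     in_interval = False
--
--     # Iterate through the vector
--     for value in vector:
--         if value != 0:
--             current_sum += value
--
--             in_interval = True
--         elif in_interval:
--             sums.append(current_sum)
--             current_sum = 0
--             in_interval = False
--
--     # Add the last interval if it ends at the end of the vector
--     if in_interval:
--         sums.append(current_sum)
--
--     return sums
-- ===== SOURCE B (Python) =====
-- from itertools import accumulate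
--
-- def sum_non_zero_intervals(vector):
--     # Staged, index-based: prefix sums + run-boundary detection, then one subtraction per run.
--     n = len(vector)
--     prefix = list(accumulate(vector, initial=0))
--     starts = [i for i in range(n) if vector[i] != 0 and (i == 0 or vector[i - 1] == 0)]
--     ends = [i for i in range(n) if vector[i] != 0 and (i == n - 1 or vector[i + 1] == 0)]
--     return [prefix[e + 1] - prefix[s] for s, e in zip(starts, ends)]
-- ===== Notes on version B (the rewrite author's own statement) =====
-- stated objective: alternative
-- what changed: Replaces A's single stateful pass (in_interval flag + running accumulator) by a staged index-based algorithm: build a prefix-sum array, detect run start and end indices by comparing each element with its neighbour, and produce each run's sum as one prefix-sum subtraction.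
import Mathlib
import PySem

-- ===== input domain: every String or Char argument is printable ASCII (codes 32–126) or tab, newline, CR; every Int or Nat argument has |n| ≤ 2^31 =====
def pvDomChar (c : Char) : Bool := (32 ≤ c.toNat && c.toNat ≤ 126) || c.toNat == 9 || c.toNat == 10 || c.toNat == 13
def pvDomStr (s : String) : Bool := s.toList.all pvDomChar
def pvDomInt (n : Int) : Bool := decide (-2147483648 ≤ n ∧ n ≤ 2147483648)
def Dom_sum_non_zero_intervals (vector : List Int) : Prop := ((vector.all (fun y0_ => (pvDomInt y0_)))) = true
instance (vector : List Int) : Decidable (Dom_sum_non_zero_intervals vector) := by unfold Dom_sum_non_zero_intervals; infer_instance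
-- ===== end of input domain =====

-- B replaces A's single stateful pass (flag + accumulator) by a staged index-based
-- algorithm: prefix sums plus boundary-index detection, one subtraction per run (alternative).


-- ===== PORT A =====
-- A's for-loop as structural recursion over the same state (sums, current_sum, in_interval)
def loopA : List Int → List Int → Int → Bool → List Int × Int × Bool
  | [], sums, current, inInt => (sums, current, inInt)
  | v :: rest, sums, current, inInt =>
    if v ≠ 0 then loopA rest sums (current + v) true
    else if inInt then loopA rest (sums ++ [current]) 0 false
    else loopA rest sums current inInt

def sum_non_zero_intervals (vector : List Int) : List Int :=
  let r := loopA vector [] 0 false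
  if r.2.2 then r.1 ++ [r.2.1] else r.1

-- ===== PORT B =====
-- Source B: prefix = list(accumulate(vector, initial=0)) ported as List.scanl (·+·) 0;
-- the two index comprehensions as filters over range(n); result by zip + subtraction.
def sum_non_zero_intervals_alt (vector : List Int) : List Int :=
  let n : Int := (vector.length : Int)
  let pre : List Int := List.scanl (· + ·) 0 vector
  let starts : List Int := (PySem.List.pyRange 0 n 1).filter
      (fun i => PySem.List.pyGetD vector i 0 != 0 &&
        (i == 0 || PySem.List.pyGetD vector (i - 1) 0 == 0))
  let ends : List Int := (PySem.List.pyRange 0 n 1).filter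
      (fun i => PySem.List.pyGetD vector i 0 != 0 &&
        (i == n - 1 || PySem.List.pyGetD vector (i + 1) 0 == 0))
  (starts.zip ends).map
    (fun p => PySem.List.pyGetD pre (p.2 + 1) 0 - PySem.List.pyGetD pre p.1 0)

-- ===== PRECONDITION & SPEC =====
def Spec_sum_non_zero_intervals (vector : List Int) (out : List Int) : Prop := out = sum_non_zero_intervals_alt vector
instance (vector : List Int) (out : List Int) : Decidable (Spec_sum_non_zero_intervals vector out) := by unfold Spec_sum_non_zero_intervals; infer_instance

-- ===== CLAIM =====
def Claim_equal_sum_non_zero_intervals : Prop := ∀ (vector : List Int), Dom_sum_non_zero_intervals vector → Spec_sum_non_zero_intervals vector (sum_non_zero_intervals vector)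

-- ===== LEMMAS AND PROOFS =====

-- natural-index reading of B's boundary predicates and output (proof vehicle)
def c1 (l : List Int) (i : Nat) : Bool :=
  (l.getD i 0 != 0) && (i == 0 || l.getD (i - 1) 0 == 0)
def c2 (l : List Int) (i : Nat) : Bool :=
  (l.getD i 0 != 0) && (i + 1 == l.length || l.getD (i + 1) 0 == 0)
def Sn (l : List Int) : List Nat := (List.range l.length).filter (c1 l)
def En (l : List Int) : List Nat := (List.range l.length).filter (c2 l)
def Bnat (l : List Int) : List Int :=
  ((Sn l).zip (En l)).map (fun p => (l.take (p.2 + 1)).sum - (l.take p.1).sum)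

theorem scanl_getD (l : List Int) : ∀ (a : Int) (k : Nat), k ≤ l.length →
    (List.scanl (· + ·) a l).getD k 0 = a + (l.take k).sum := by
  induction l with
  | nil => intro a k hk; simp at hk; simp [hk, List.scanl]
  | cons x xs ih =>
    intro a k hk
    cases k with
    | zero => simp [List.scanl_cons]
    | succ k =>
      rw [List.scanl_cons, List.getD_cons_succ, List.take_succ_cons, List.sum_cons,
        ih (a + x) k (by simpa using hk)]
      ring

theorem alt_eq_Bnat (l : List Int) : sum_non_zero_intervals_alt l = Bnat l := by
  dsimp only [sum_non_zero_intervals_alt, Bnat]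
  rw [PySem.List.pyRange_one]
  simp only [Int.sub_zero, Int.toNat_natCast, zero_add]
  rw [List.filter_map, List.filter_map, List.zip_map, List.map_map]
  have hc1 : ((fun i : Int => PySem.List.pyGetD l i 0 != 0 &&
      (i == 0 || PySem.List.pyGetD l (i - 1) 0 == 0)) ∘ (fun k : Nat => (k : Int))) = c1 l := by
    funext k
    cases k with
    | zero =>
      simp only [Function.comp_apply, Nat.cast_zero, c1, PySem.List.pyGetD_zero]
      simp
    | succ k =>
      have hm : ((k + 1 : Nat) : Int) - 1 = ((k : Nat) : Int) := by push_cast; ring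
      have hI : ((((k + 1 : Nat)) : Int) == 0) = false := by
        rw [beq_eq_false_iff_ne]; omega
      have hN : ((k + 1 : Nat) == 0) = false := by
        rw [beq_eq_false_iff_ne]; omega
      simp only [Function.comp_apply, hm, PySem.List.pyGetD_natCast, c1, hI, hN,
        Bool.false_or, Nat.add_sub_cancel]
  have hc2 : ((fun i : Int => PySem.List.pyGetD l i 0 != 0 &&
      (i == (l.length : Int) - 1 || PySem.List.pyGetD l (i + 1) 0 == 0)) ∘ (fun k : Nat => (k : Int))) = c2 l := by
    funext k
    have hm : ((k : Nat) : Int) + 1 = ((k + 1 : Nat) : Int) := by push_cast; ring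
    have hb : (((k : Nat) : Int) == (l.length : Int) - 1) = (k + 1 == l.length) := by
      by_cases h : k + 1 = l.length
      · have h1 : ((k : Nat) : Int) = (l.length : Int) - 1 := by omega
        have h2 : ((k + 1 : Nat) == l.length) = true := by rw [beq_iff_eq]; omega
        rw [h2, h1, beq_self_eq_true]
      · have h1 : (((k : Nat) : Int) == (l.length : Int) - 1) = false := by
          rw [beq_eq_false_iff_ne]; omega
        have h2 : ((k + 1 : Nat) == l.length) = false := by
          rw [beq_eq_false_iff_ne]; omega
        rw [h1, h2]
    simp only [Function.comp_apply, hm, hb, PySem.List.pyGetD_natCast, c2]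
  rw [hc1, hc2]
  apply List.map_congr_left
  rintro ⟨s, e⟩ hmem
  obtain ⟨hs, he⟩ := List.of_mem_zip hmem
  have hsn : s < l.length := List.mem_range.mp (List.mem_filter.mp hs).1
  have hen : e < l.length := List.mem_range.mp (List.mem_filter.mp he).1
  simp only [Function.comp_apply, Prod.map_fst, Prod.map_snd]
  have hce : ((e : Nat) : Int) + 1 = ((e + 1 : Nat) : Int) := by push_cast; ring
  rw [hce, PySem.List.pyGetD_natCast, PySem.List.pyGetD_natCast,
    scanl_getD l 0 (e + 1) (by omega), scanl_getD l 0 s (by omega)]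
  ring

theorem filter_range_singleton (p : Nat → Bool) : ∀ (m j : Nat), j < m → p j = true →
    (∀ i, i < m → i ≠ j → p i = false) → (List.range m).filter p = [j] := by
  intro m
  induction m with
  | zero => intro j hj _ _; omega
  | succ m ih =>
    intro j hj hpj hrest
    rw [List.range_succ, List.filter_append]
    by_cases hjm : j = m
    · have hnil : (List.range m).filter p = [] := by
        rw [List.filter_eq_nil_iff]
        intro i hi; simp only [List.mem_range] at hi
        simp [hrest i (by omega) (by omega)]
      rw [hnil, hjm]
      simp [hjm ▸ hpj]
    · rw [ih j (by omega) hpj (fun i hi hij => hrest i (by omega) hij)]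
      simp [hrest m (by omega) (by omega)]

theorem run_ne (r : List Int) (hall : ∀ v ∈ r, v ≠ 0) (i : Nat) (hi : i < r.length) :
    r[i] ≠ 0 := hall _ (List.getElem_mem hi)

theorem optD_ne (r : List Int) (hall : ∀ v ∈ r, v ≠ 0) (i : Nat) (hi : i < r.length) :
    r[i]?.getD 0 ≠ 0 := by
  rw [List.getElem?_eq_getElem hi]
  exact run_ne r hall i hi

theorem app?_left (r rest : List Int) (i : Nat) (h : i < r.length) :
    (r ++ rest)[i]? = some r[i] := by
  rw [List.getElem?_append_left (by simpa using h)]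
  exact List.getElem?_eq_getElem h

theorem app?_sep (r ys : List Int) : (r ++ 0 :: ys)[r.length]? = some 0 := by
  rw [List.getElem?_append_right (by simp)]
  simp

theorem app?_right (r ys : List Int) (m : Nat) :
    (r ++ 0 :: ys)[r.length + 1 + m]? = ys[m]? := by
  rw [List.getElem?_append_right (by omega)]
  rw [show r.length + 1 + m - r.length = m + 1 by omega]
  simp

-- === cons-zero case ===
theorem Sn_cons_zero (xs : List Int) : Sn (0 :: xs) = (Sn xs).map Nat.succ := by
  unfold Sn
  rw [show (0 :: xs).length = xs.length + 1 from rfl, List.range_succ_eq_map,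
    List.filter_cons_of_neg (by simp [c1]), List.filter_map]
  congr 1
  apply List.filter_congr
  intro k _
  cases k with
  | zero => simp [c1]
  | succ k => simp [c1]

theorem En_cons_zero (xs : List Int) : En (0 :: xs) = (En xs).map Nat.succ := by
  unfold En
  rw [show (0 :: xs).length = xs.length + 1 from rfl, List.range_succ_eq_map,
    List.filter_cons_of_neg (by simp [c2]), List.filter_map]
  congr 1
  apply List.filter_congr
  intro k _
  have hb : (k + 1 + 1 == (0 :: xs).length) = (k + 1 == xs.length) := by
    by_cases h : k + 1 = xs.length
    · rw [beq_iff_eq.mpr (by simp [h]), beq_iff_eq.mpr h]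
    · rw [beq_eq_false_iff_ne.mpr (by simp; omega), beq_eq_false_iff_ne.mpr h]
  simp only [Function.comp_apply, c2, Nat.succ_eq_add_one, List.getD_cons_succ, hb]

theorem Bnat_cons_zero (xs : List Int) : Bnat (0 :: xs) = Bnat xs := by
  unfold Bnat
  rw [Sn_cons_zero, En_cons_zero, List.zip_map, List.map_map]
  apply List.map_congr_left
  rintro ⟨s, e⟩ _
  simp [Nat.succ_eq_add_one]

-- === run case ===
theorem Sn_run (r ys : List Int) (hr : r ≠ []) (hall : ∀ v ∈ r, v ≠ 0) :
    Sn (r ++ 0 :: ys) = 0 :: (Sn ys).map (r.length + 1 + ·) := by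
  have hrpos : 0 < r.length := List.length_pos_iff.mpr hr
  unfold Sn
  rw [show (r ++ 0 :: ys).length = (r.length + 1) + ys.length by simp; omega,
    List.range_add, List.filter_append, List.filter_map]
  have hpart1 : (List.range (r.length + 1)).filter (c1 (r ++ 0 :: ys)) = [0] := by
    apply filter_range_singleton
    · omega
    · simp only [c1, List.getD_eq_getElem?_getD, app?_left r (0 :: ys) 0 hrpos]
      simp [run_ne r hall 0 hrpos]
    · intro i hi hne
      by_cases hlt : i < r.length
      · have h3 : (i == 0) = false := beq_eq_false_iff_ne.mpr hne
        simp [c1, h3, app?_left r (0 :: ys) (i - 1) (by omega),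
          run_ne r hall (i - 1) (by omega)]
      · have hieq : i = r.length := by omega
        simp [c1, hieq, app?_sep]
  have hpart2 : (List.range ys.length).filter (c1 (r ++ 0 :: ys) ∘ (r.length + 1 + ·))
      = (List.range ys.length).filter (c1 ys) := by
    apply List.filter_congr
    intro k _
    have h0 : (r.length + 1 + k == 0) = false := beq_eq_false_iff_ne.mpr (by omega)
    cases k with
    | zero =>
      have hprev : r.length + 1 + 0 - 1 = r.length := by omega
      simp [c1, app?_right r ys 0, hprev, app?_sep, h0]
    | succ k =>
      have hprev : r.length + 1 + (k + 1) - 1 = r.length + 1 + k := by omega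
      have hk0 : (k + 1 == 0) = false := by rw [beq_eq_false_iff_ne]; omega
      simp only [Function.comp_apply, c1, List.getD_eq_getElem?_getD,
        app?_right r ys (k + 1), hprev, app?_right r ys k, h0, hk0,
        Bool.false_or, Nat.add_sub_cancel]
  rw [hpart1, hpart2]
  rfl

theorem En_run (r ys : List Int) (hr : r ≠ []) (hall : ∀ v ∈ r, v ≠ 0) :
    En (r ++ 0 :: ys) = (r.length - 1) :: (En ys).map (r.length + 1 + ·) := by
  have hrpos : 0 < r.length := List.length_pos_iff.mpr hr
  unfold En
  rw [show (r ++ 0 :: ys).length = (r.length + 1) + ys.length by simp; omega,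
    List.range_add, List.filter_append, List.filter_map]
  have hpart1 : (List.range (r.length + 1)).filter (c2 (r ++ 0 :: ys)) = [r.length - 1] := by
    apply filter_range_singleton
    · omega
    · have hsep : r.length - 1 + 1 = r.length := by omega
      simp [c2, app?_left r (0 :: ys) (r.length - 1) (by omega),
        run_ne r hall (r.length - 1) (by omega), hsep, app?_sep]
    · intro i hi hne
      by_cases hlt : i < r.length - 1
      · have hb : (i + 1 == (r ++ 0 :: ys).length) = false := by
          rw [beq_eq_false_iff_ne]; simp; omega
        simp [c2, hb, app?_left r (0 :: ys) (i + 1) (by omega),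
          run_ne r hall (i + 1) (by omega)]
        intro _
        omega
      · have hieq : i = r.length := by omega
        simp [c2, hieq, app?_sep]
  have hpart2 : (List.range ys.length).filter (c2 (r ++ 0 :: ys) ∘ (r.length + 1 + ·))
      = (List.range ys.length).filter (c2 ys) := by
    apply List.filter_congr
    intro k _
    have hb : (r.length + 1 + (k + 1) == (r ++ 0 :: ys).length) = (k + 1 == ys.length) := by
      by_cases h : k + 1 = ys.length
      · rw [beq_iff_eq.mpr (by simp; omega), beq_iff_eq.mpr h]
      · rw [beq_eq_false_iff_ne.mpr (by simp; omega), beq_eq_false_iff_ne.mpr h]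
    have hnext : r.length + 1 + k + 1 = r.length + 1 + (k + 1) := by omega
    simp only [Function.comp_apply, c2, List.getD_eq_getElem?_getD,
      app?_right r ys k, hnext, hb, app?_right r ys (k + 1)]
  rw [hpart1, hpart2]
  rfl

theorem take_run (r ys : List Int) (m : Nat) :
    ((r ++ 0 :: ys).take (r.length + 1 + m)).sum = r.sum + (ys.take m).sum := by
  rw [show r.length + 1 + m = r.length + (1 + m) by omega, List.take_length_add_append]
  rw [show (1 + m) = m + 1 by omega]
  simp

theorem Bnat_run (r ys : List Int) (hr : r ≠ []) (hall : ∀ v ∈ r, v ≠ 0) :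
    Bnat (r ++ 0 :: ys) = r.sum :: Bnat ys := by
  have hrpos : 0 < r.length := List.length_pos_iff.mpr hr
  unfold Bnat
  rw [Sn_run r ys hr hall, En_run r ys hr hall]
  rw [show ((0 : Nat) :: (Sn ys).map (r.length + 1 + ·)).zip ((r.length - 1) :: (En ys).map (r.length + 1 + ·))
      = (0, r.length - 1) :: ((Sn ys).map (r.length + 1 + ·)).zip ((En ys).map (r.length + 1 + ·)) from rfl]
  rw [List.map_cons, List.zip_map, List.map_map]
  congr 1
  · rw [show r.length - 1 + 1 = r.length by omega]
    rw [show (r ++ 0 :: ys).take r.length = r by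
      have h := List.take_length_add_append (l₁ := r) (l₂ := 0 :: ys) 0
      simpa using h]
    simp
  · apply List.map_congr_left
    rintro ⟨s, e⟩ _
    simp only [Function.comp_apply, Prod.map_fst, Prod.map_snd]
    have h1 : r.length + 1 + e + 1 = r.length + 1 + (e + 1) := by omega
    rw [h1, take_run r ys (e + 1), take_run r ys s]
    ring

-- === terminal run ===
theorem Bnat_run_end (r : List Int) (hr : r ≠ []) (hall : ∀ v ∈ r, v ≠ 0) :
    Bnat r = [r.sum] := by
  have hrpos : 0 < r.length := List.length_pos_iff.mpr hr
  have hS : Sn r = [0] := by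
    unfold Sn
    apply filter_range_singleton
    · omega
    · simp only [c1, List.getD_eq_getElem?_getD]
      simp [optD_ne r hall 0 hrpos]
    · intro i hi hne
      have h3 : (i == 0) = false := beq_eq_false_iff_ne.mpr hne
      simp [c1, h3]
      exact fun _ => optD_ne r hall (i - 1) (by omega)
  have hE : En r = [r.length - 1] := by
    unfold En
    apply filter_range_singleton
    · omega
    · have hb : (r.length - 1 + 1 == r.length) = true := by rw [beq_iff_eq]; omega
      simp [c2, hb]
      exact optD_ne r hall (r.length - 1) (by omega)
    · intro i hi hne
      have hb : (i + 1 == r.length) = false := by rw [beq_eq_false_iff_ne]; omega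
      simp [c2, hb]
      exact fun _ => optD_ne r hall (i + 1) (by omega)
  unfold Bnat
  rw [hS, hE]
  simp [show r.length - 1 + 1 = r.length by omega]

-- ===== A-side loop lemmas =====
theorem loopA_acc (l : List Int) : ∀ (sums : List Int) (c : Int) (b : Bool),
    loopA l sums c b = (sums ++ (loopA l [] c b).1, (loopA l [] c b).2) := by
  induction l with
  | nil => intro sums c b; simp [loopA]
  | cons v rest ih =>
    intro sums c b
    by_cases hv : v = 0
    · subst hv
      cases b with
      | false =>
        show loopA rest sums c false = (sums ++ (loopA rest [] c false).1, (loopA rest [] c false).2)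
        exact ih sums c false
      | true =>
        show loopA rest (sums ++ [c]) 0 false
            = (sums ++ (loopA rest [c] 0 false).1, (loopA rest [c] 0 false).2)
        rw [ih (sums ++ [c]) 0 false, ih [c] 0 false]
        simp [List.append_assoc]
    · simp only [loopA, if_pos hv, ne_eq]
      rw [ih sums (c + v) true, ih [] (c + v) true]

theorem loopA_append (a b : List Int) : ∀ (s : List Int) (c : Int) (f : Bool),
    loopA (a ++ b) s c f = loopA b (loopA a s c f).1 (loopA a s c f).2.1 (loopA a s c f).2.2 := by
  induction a with
  | nil => intro s c f; simp [loopA]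
  | cons v rest ih =>
    intro s c f
    by_cases hv : v = 0
    · subst hv
      cases f with
      | false =>
        show loopA (rest ++ b) s c false = _
        exact ih s c false
      | true =>
        show loopA (rest ++ b) (s ++ [c]) 0 false = _
        exact ih (s ++ [c]) 0 false
    · simp only [List.cons_append, loopA, if_pos hv, ne_eq]
      exact ih s (c + v) true

theorem loopA_run (r : List Int) : (∀ v ∈ r, v ≠ 0) → ∀ (sums : List Int) (c : Int),
    loopA r sums c true = (sums, c + r.sum, true) := by
  induction r with
  | nil => intro _ sums c; simp [loopA]
  | cons x r' ih =>
    intro hall sums c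
    have hx : x ≠ 0 := hall x (by simp)
    simp only [loopA, if_pos hx, ne_eq]
    rw [ih (fun v hv => hall v (by simp [hv])) sums (c + x)]
    simp [List.sum_cons]; ring

theorem loopA_run0 (r : List Int) (hr : r ≠ []) (hall : ∀ v ∈ r, v ≠ 0) :
    loopA r [] 0 false = ([], r.sum, true) := by
  obtain ⟨x, r', rfl⟩ := List.exists_cons_of_ne_nil hr
  have hx : x ≠ 0 := hall x (by simp)
  simp only [loopA, if_pos hx, ne_eq]
  rw [loopA_run r' (fun v hv => hall v (by simp [hv])) [] (0 + x)]
  simp [List.sum_cons]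

theorem A_cons_zero (xs : List Int) :
    sum_non_zero_intervals (0 :: xs) = sum_non_zero_intervals xs := by
  simp [sum_non_zero_intervals, loopA]

theorem A_run (r ys : List Int) (hr : r ≠ []) (hall : ∀ v ∈ r, v ≠ 0) :
    sum_non_zero_intervals (r ++ 0 :: ys) = r.sum :: sum_non_zero_intervals ys := by
  dsimp only [sum_non_zero_intervals]
  rw [loopA_append r (0 :: ys) [] 0 false, loopA_run0 r hr hall]
  have h05 : loopA (0 :: ys) (([] : List Int), r.sum, true).1 (([] : List Int), r.sum, true).2.1
        (([] : List Int), r.sum, true).2.2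
      = loopA ys [r.sum] 0 false := by simp [loopA]
  rw [h05, loopA_acc ys [r.sum] 0 false]
  cases h : (loopA ys [] 0 false).2.2 <;> simp [h]

theorem A_run_end (r : List Int) (hr : r ≠ []) (hall : ∀ v ∈ r, v ≠ 0) :
    sum_non_zero_intervals r = [r.sum] := by
  dsimp only [sum_non_zero_intervals]
  rw [loopA_run0 r hr hall]
  simp

-- ===== main induction: runs decomposition =====
theorem main_eq : ∀ (N : Nat) (l : List Int), l.length ≤ N →
    sum_non_zero_intervals l = Bnat l := by
  intro N
  induction N with
  | zero =>
    intro l hl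
    have : l = [] := List.eq_nil_of_length_eq_zero (by omega)
    subst this
    rfl
  | succ N ih =>
    intro l hl
    match l with
    | [] => rfl
    | x :: xs =>
      by_cases hx : x = 0
      · subst hx
        rw [A_cons_zero, Bnat_cons_zero]
        exact ih xs (by simp at hl; omega)
      · obtain ⟨R, hR⟩ : ∃ R, (x :: xs).takeWhile (fun v => v != 0) = R := ⟨_, rfl⟩
        have hRne : R ≠ [] := by
          rw [← hR, List.takeWhile_cons_of_pos (by simp [hx])]; simp
        have hallR : ∀ v ∈ R, v ≠ 0 := by
          intro v hv
          rw [← hR] at hv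
          simpa using List.mem_takeWhile_imp hv
        cases hdrop : (x :: xs).dropWhile (fun v => v != 0) with
        | nil =>
          have hsplit : R = x :: xs := by
            have h := List.takeWhile_append_dropWhile (p := fun v => v != 0) (l := x :: xs)
            rw [hR, hdrop, List.append_nil] at h
            exact h
          rw [← hsplit, A_run_end R hRne hallR, Bnat_run_end R hRne hallR]
        | cons z zs =>
          have hz : z = 0 := by
            have hne : (x :: xs).dropWhile (fun v => v != 0) ≠ [] := by rw [hdrop]; simp
            have h := List.head_dropWhile_not (fun v => v != 0) hne
            simp only [hdrop] at h
            simpa using h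
          subst hz
          have hsplit : R ++ 0 :: zs = x :: xs := by
            have h := List.takeWhile_append_dropWhile (p := fun v => v != 0) (l := x :: xs)
            rw [hR, hdrop] at h
            exact h
          have hlen : zs.length ≤ N := by
            have := congrArg List.length hsplit
            simp at this ⊢
            have := List.length_pos_iff.mpr hRne
            simp at hl
            omega
          rw [← hsplit, A_run R zs hRne hallR, Bnat_run R zs hRne hallR, ih zs hlen]

-- ===== VERDICT =====
theorem sum_non_zero_intervals_spec : Claim_equal_sum_non_zero_intervals := by
  intro vector _
  unfold Spec_sum_non_zero_intervals
  rw [alt_eq_Bnat]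
  exact main_eq vector.length vector le_rfl
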